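-- pv_equiv track=rewrite | github.com/newsteinking/workspace_backup | workspace_A/workspace_kimsh/Learn to Program with Minecraft Code실습/chapter11-files/mmm1_3.py | damjang
-- ===== SOURCE A (Python) =====
-- def damjang(aa,b):
--     road=0
--     for key in aa:
--         if key<=b:
--             road+=1
--         else:
--             road+=2
--     return road
-- ===== SOURCE B (Python) =====
-- def damjang(aa, b):
--     s = sorted(aa)
--     lo, hi = 0, len(s)
--     while lo < hi:
--         mid = (lo + hi) // 2
--         if s[mid] <= b:
--             lo = mid + 1
--         else:
--             hi = mid
--     return 2 * len(s) - lo
-- ===== Notes on version B (the rewrite author's own statement) =====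
-- stated objective: alternative
-- what changed: Instead of a linear pass adding 1 or 2 per element, B sorts the list and binary-searches (bisect_right by hand) for the number lo of elements <= b, returning 2*len(aa) - lo.
import Mathlib
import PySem

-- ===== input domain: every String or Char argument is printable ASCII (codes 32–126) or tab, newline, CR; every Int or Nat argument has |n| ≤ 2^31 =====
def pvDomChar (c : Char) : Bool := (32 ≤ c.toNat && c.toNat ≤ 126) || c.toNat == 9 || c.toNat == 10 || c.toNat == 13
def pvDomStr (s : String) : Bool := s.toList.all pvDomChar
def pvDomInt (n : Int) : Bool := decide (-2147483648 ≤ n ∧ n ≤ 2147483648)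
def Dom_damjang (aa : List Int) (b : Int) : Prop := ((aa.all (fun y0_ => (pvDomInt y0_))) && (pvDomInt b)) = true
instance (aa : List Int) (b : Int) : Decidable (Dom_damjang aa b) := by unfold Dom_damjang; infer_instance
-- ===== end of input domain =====

-- B sorts the list and binary-searches for the count of elements ≤ b instead of A's linear 1/2 accumulator (objective: alternative).
-- ===== PORT A =====
def damjang (aa : List Int) (b : Int) : Int :=
  aa.foldl (fun road key => if key ≤ b then road + 1 else road + 2) 0

-- ===== PORT B =====
-- the while-loop of Source B: lo, hi are Nat (they stay in 0..len in Python too; (lo+hi)//2 on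
-- naturals is exactly Python's //); s[mid] is ported as getD mid 0, exact because the loop
-- keeps mid < len(s) whenever it is read (lo < hi ≤ len s throughout).
def damjangBsearch (s : List Int) (b : Int) (lo hi : Nat) : Nat :=
  if _h : lo < hi then
    let mid := (lo + hi) / 2
    if s.getD mid 0 ≤ b then damjangBsearch s b (mid + 1) hi
    else damjangBsearch s b lo mid
  else lo
termination_by hi - lo
decreasing_by all_goals omega

def damjang_alt (aa : List Int) (b : Int) : Int :=
  let s := PySem.List.sorted aa (fun x => x) false
  2 * (s.length : Int) - (damjangBsearch s b 0 s.length : Int)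

-- ===== PRECONDITION & SPEC =====
def Spec_damjang (aa : List Int) (b : Int) (out : Int) : Prop := out = damjang_alt aa b
instance (aa : List Int) (b : Int) (out : Int) : Decidable (Spec_damjang aa b out) := by unfold Spec_damjang; infer_instance

-- ===== CLAIM (what is proved, stated in full; the proofs are below) =====
def Claim_equal_damjang : Prop := ∀ (aa : List Int) (b : Int), Dom_damjang aa b → Spec_damjang aa b (damjang aa b)

-- ===== LEMMAS AND PROOFS =====

-- A's fold counts 1 per element plus 1 per element > b.
theorem damjang_fold_eq (b : Int) (aa : List Int) (r : Int) :
    aa.foldl (fun road key => if key ≤ b then road + 1 else road + 2) r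
      = r + (aa.length : Int) + (aa.countP (fun key => decide (b < key)) : Int) := by
  induction aa generalizing r with
  | nil => simp
  | cons x xs ih =>
    simp only [List.foldl_cons, List.countP_cons, ih]
    by_cases h : x ≤ b
    · simp [h, not_lt.mpr h]; ring
    · simp [h, lt_of_not_ge h]; ring

-- countP of a predicate true exactly on indices < k equals k.
theorem countP_eq_cut (s : List Int) (p : Int → Bool) (k : Nat) (hk : k ≤ s.length)
    (h1 : ∀ i, (hi : i < k) → p (s[i]'(lt_of_lt_of_le hi hk)) = true)
    (h2 : ∀ i, (hi : i < s.length) → k ≤ i → p s[i] = false) :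
    s.countP p = k := by
  have hs : s = s.take k ++ s.drop k := (List.take_append_drop k s).symm
  rw [hs, List.countP_append]
  have ht : (s.take k).countP p = (s.take k).length := by
    rw [List.countP_eq_length]
    intro a ha
    obtain ⟨i, hi, rfl⟩ := List.mem_take_iff_getElem.mp ha
    exact h1 i (by omega)
  have hd : (s.drop k).countP p = 0 := by
    rw [List.countP_eq_zero]
    intro a ha
    obtain ⟨i, hi, rfl⟩ := List.getElem_of_mem ha
    rw [List.getElem_drop]
    simp [h2 (k + i) (by simp at hi; omega) (by omega)]
  rw [ht, hd, List.length_take]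
  omega

-- binary-search invariant: on a sorted list the loop returns the count of elements ≤ b.
theorem damjangBsearch_correct (s : List Int) (b : Int)
    (hsort : s.Pairwise (· ≤ ·)) :
    ∀ (lo hi : Nat), lo ≤ hi → hi ≤ s.length →
    (∀ i, (hi' : i < s.length) → i < lo → s[i] ≤ b) →
    (∀ i, (hi' : i < s.length) → hi ≤ i → b < s[i]) →
    damjangBsearch s b lo hi = s.countP (fun x => decide (x ≤ b)) := by
  have mono := List.pairwise_iff_getElem.mp hsort
  intro lo hi
  induction hn : hi - lo using Nat.strong_induction_on generalizing lo hi with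
  | _ n ih =>
  intro hlh hhl hpre hpost
  rw [damjangBsearch]
  by_cases h : lo < hi
  · simp only [h, dif_pos]
    have hmid : (lo + hi) / 2 < s.length := by omega
    set mid := (lo + hi) / 2 with hmiddef
    have hget : s.getD mid 0 = s[mid] := List.getD_eq_getElem s 0 hmid
    by_cases hv : s.getD mid 0 ≤ b
    · simp only [hv, if_pos]
      refine ih (hi - (mid + 1)) (by omega) (mid + 1) hi rfl (by omega) hhl ?_ hpost
      intro i hi' hilt
      rcases Nat.lt_or_ge i mid with hc | hc
      · exact le_trans ((mono i mid (by omega) hmid hc)) (hget ▸ hv)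
      · have : i = mid := by omega
        subst this; exact hget ▸ hv
    · simp only [hv, if_false]
      have hvb : b < s[mid] := hget ▸ lt_of_not_ge hv
      refine ih (mid - lo) (by omega) lo mid rfl (by omega) (by omega) hpre ?_
      intro i hi' hle
      rcases Nat.lt_or_ge mid i with hc | hc
      · exact lt_of_lt_of_le hvb (mono mid i hmid hi' hc)
      · have : i = mid := by omega
        subst this; exact hvb
  · simp only [dif_neg h]
    have hk : lo = hi := by omega
    subst hk
    refine (countP_eq_cut s _ lo (by omega) ?_ ?_).symm
    · intro i hi'; simp [hpre i (by omega) hi']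
    · intro i hi' hle; simp [not_le.mpr (hpost i hi' hle)]

theorem countP_le_add_gt (b : Int) (aa : List Int) :
    aa.countP (fun x => decide (x ≤ b)) + aa.countP (fun key => decide (b < key))
      = aa.length := by
  induction aa with
  | nil => simp
  | cons x xs ihx =>
    simp only [List.countP_cons, List.length_cons]
    by_cases h : x ≤ b
    · simp [h, not_lt.mpr h]; omega
    · simp [h, lt_of_not_ge h]; omega

theorem damjang_spec : Claim_equal_damjang := by
  intro aa b _
  unfold Spec_damjang damjang damjang_alt
  have hperm : (PySem.List.sorted aa (fun x => x) false).Perm aa := PySem.List.sorted_perm aa _ _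
  have hpair : (PySem.List.sorted aa (fun x => x) false).Pairwise (· ≤ ·) := by
    simpa using PySem.List.sorted_pairwise aa (fun x => x)
  set s := PySem.List.sorted aa (fun x => x) false with hs
  have hbs : damjangBsearch s b 0 s.length = s.countP (fun x => decide (x ≤ b)) :=
    damjangBsearch_correct s b hpair 0 s.length (by omega) (by omega)
      (by intro i _ h; omega) (by intro i hi' h; omega)
  simp only [damjang_fold_eq b aa 0, hbs]
  have hlen : s.length = aa.length := hperm.length_eq
  have hcnt : s.countP (fun x => decide (x ≤ b)) = aa.countP (fun x => decide (x ≤ b)) :=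
    hperm.countP_eq _
  have hsplit := countP_le_add_gt b aa
  simp only [hcnt, hlen]
  omega
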